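-- pv_equiv track=rewrite | github.com/SahilSahu73/KnowledgeBase | DSA/python/Subarray_with_sum_k.py | max_xor_sum
-- ===== SOURCE A (Python) =====
-- def max_xor_sum(nums: list, k: int):
--     n = len(nums)
--     max_sum = 0
--     for i in range(k+1):
--         temp_sum = 0
--         for j in range(n):
--             temp_sum += i ^ nums[j]
--             max_sum = max(max_sum, temp_sum)
--     return max_sum
-- ===== SOURCE B (Python) =====
-- def max_xor_sum(nums, k):
--     # For 0 <= i < 2**nb:  sum_{j<p} (i ^ nums[j]) = T(p) + sum_{b: bit b of i} w_b(p)
--     # with w_b(p) = 2**b * (p - 2*cnt_b(p)), cnt_b(p) = #{j<p : bit b of nums[j] set}.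
--     # So per prefix p we maximise a bit-linear form over 0 <= i <= k by recursion on
--     # the bits of k (tight/free digit recursion) in O(bits^2) instead of scanning all i.
--     if k < 0:
--         return 0
--     nb = k.bit_length()
--     best = 0
--     T = 0
--     cnt = [0] * nb
--     p = 0
--     for x in nums:
--         p += 1
--         T += x
--         cnt = [cnt[b] + ((x >> b) & 1) for b in range(nb)]
--         w = [(1 << b) * (p - 2 * cnt[b]) for b in range(nb)]
--         best = max(best, T + _best_le(w, nb, k))
--     return best
--
-- def _best_free(w, nb):
--     # max over i in [0, 2**nb) of sum of w[b] over set bits of i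
--     return sum(w[b] for b in range(nb) if w[b] > 0)
--
-- def _best_le(w, nb, k):
--     # max over i in [0, k] (k < 2**nb) of sum of w[b] over set bits of i
--     if nb == 0:
--         return 0
--     if k < (1 << (nb - 1)):
--         return _best_le(w, nb - 1, k)
--     return max(_best_free(w, nb - 1), w[nb - 1] + _best_le(w, nb - 1, k - (1 << (nb - 1))))
-- ===== Notes on version B (the rewrite author's own statement) =====
-- stated objective: faster
-- what changed: Instead of rescanning nums for every i in 0..k (O(n*k) grid of prefix sums), B decomposes sum_{j<p}(i^nums[j]) into T(p) plus a bit-linear form via per-bit set counts, and maximises that form over 0<=i<=k by a tight/free digit recursion on the bits of k, O(bits^2) per prefix.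
import Mathlib
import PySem

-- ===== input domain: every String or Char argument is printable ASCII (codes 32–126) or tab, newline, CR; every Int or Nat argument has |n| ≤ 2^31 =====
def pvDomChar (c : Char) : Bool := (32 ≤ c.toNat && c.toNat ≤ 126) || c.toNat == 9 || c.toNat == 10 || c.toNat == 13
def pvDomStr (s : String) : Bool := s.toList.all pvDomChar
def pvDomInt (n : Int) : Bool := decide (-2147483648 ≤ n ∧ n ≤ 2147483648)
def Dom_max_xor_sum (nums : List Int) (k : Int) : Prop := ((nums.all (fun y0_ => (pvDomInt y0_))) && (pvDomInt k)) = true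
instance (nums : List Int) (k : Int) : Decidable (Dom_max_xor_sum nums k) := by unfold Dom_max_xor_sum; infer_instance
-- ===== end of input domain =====

-- B replaces A's scan of all i in 0..k (each rescanning nums) by a per-bit decomposition:
-- sum_{j<p}(i^nums[j]) = T(p) + a bit-linear form in i built from per-bit set counts, maximised
-- over 0 <= i <= k by a tight/free digit recursion on the bits of k (objective: faster).

-- ===== PORT A =====
def max_xor_sum (nums : List Int) (k : Int) : Int :=
  let n : Int := nums.length
  (PySem.List.pyRange 0 (k + 1) 1).foldl
    (fun max_sum i =>
      ((PySem.List.pyRange 0 n 1).foldl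
        (fun (st : Int × Int) j =>
          let temp_sum := st.1 + PySem.Int.bxor i (PySem.List.pyGetD nums j 0)
          (temp_sum, max st.2 temp_sum))
        (0, max_sum)).2)
    0

-- ===== PORT B =====
-- sum(w[b] for b in range(nb) if w[b] > 0)
def bestFree (w : List Int) (nb : Nat) : Int :=
  (((List.range nb).filter (fun b => decide (0 < w.getD b 0))).map (fun b => w.getD b 0)).sum

-- _best_le(w, nb, k): recursion on the bit count nb, exactly Source B's recursion
def bestLE (w : List Int) : Nat → Int → Int
  | 0, _ => 0
  | nb + 1, k =>
      if k < (1 <<< nb : Int) then bestLE w nb k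
      else max (bestFree w nb) (w.getD nb 0 + bestLE w nb (k - (1 <<< nb : Int)))

def max_xor_sum_alt (nums : List Int) (k : Int) : Int :=
  if k < 0 then 0
  else
    let nb := PySem.Int.bitLength k
    (nums.foldl
      (fun (st : Int × Int × List Int × Int) x =>
        let p := st.1 + 1
        let T := st.2.1 + x
        let cnt := (List.range nb).map (fun b => st.2.2.1.getD b 0 + PySem.Int.band (x >>> b) 1)
        let w := (List.range nb).map (fun b => (1 <<< b : Int) * (p - 2 * cnt.getD b 0))
        (p, T, cnt, max st.2.2.2 (T + bestLE w nb k)))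
      (0, 0, List.replicate nb 0, 0)).2.2.2

-- ===== PRECONDITION & SPEC =====
def Spec_max_xor_sum (nums : List Int) (k : Int) (out : Int) : Prop := out = max_xor_sum_alt nums k
instance (nums : List Int) (k : Int) (out : Int) : Decidable (Spec_max_xor_sum nums k out) := by unfold Spec_max_xor_sum; infer_instance

-- ===== CLAIM (what is proved, stated in full; the proofs are below) =====
def Claim_equal_max_xor_sum : Prop := ∀ (nums : List Int) (k : Int), Dom_max_xor_sum nums k → Spec_max_xor_sum nums k (max_xor_sum nums k)

-- ===== LEMMAS AND PROOFS =====

-- sum of i ^ x over a list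
def xsum (i : Int) (l : List Int) : Int := (l.map (fun x => PySem.Int.bxor i x)).sum

-- the prefix sums of (i ^ ·) over l, starting from t (A's inner loop row, left to right)
def rowvals (i : Int) : Int → List Int → List Int
  | _, [] => []
  | t, x :: xs => (t + PySem.Int.bxor i x) :: rowvals i (t + PySem.Int.bxor i x) xs

-- all grid values { sum_{j<p} (i ^ nums[j]) : i ∈ is, 1 ≤ p ≤ |l| }, row-major (A's order)
def allvals (is : List Int) (l : List Int) : List Int :=
  is.flatMap (fun i => rowvals i 0 l)

-- bit b of x, Python's (x >> b) & 1 (two's complement on negatives)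
def pbit (x : Int) (b : Nat) : Int := PySem.Int.mod (PySem.Int.floordiv x (2 ^ b)) 2

-- number of elements of l with bit b set
def cntb (b : Nat) (l : List Int) : Int := (l.map (fun x => pbit x b)).sum

-- the weight list B's loop builds for the prefix l
def wlist (nb : Nat) (l : List Int) : List Int :=
  (List.range nb).map (fun b => 2 ^ b * ((l.length : Int) - 2 * cntb b l))

-- the bit-linear form: sum of w[b] over set bits b < nb of i
def LW (w : List Int) (nb : Nat) (i : Int) : Int :=
  ∑ b ∈ Finset.range nb, pbit i b * w.getD b 0

theorem xsum_cons (i x : Int) (l : List Int) :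
    xsum i (x :: l) = PySem.Int.bxor i x + xsum i l := by simp [xsum]

theorem mem_rowvals (i : Int) (l : List Int) :
    ∀ (t a : Int), a ∈ rowvals i t l ↔ ∃ p : Nat, p < l.length ∧ a = t + xsum i (l.take (p + 1)) := by
  induction l with
  | nil => intro t a; simp [rowvals]
  | cons x xs ih =>
    intro t a
    simp only [rowvals, List.mem_cons, ih]
    constructor
    · rintro (rfl | ⟨p, hp, rfl⟩)
      · exact ⟨0, by simp, by simp [xsum]⟩
      · exact ⟨p + 1, by simp; omega, by simp [List.take_succ_cons, xsum_cons]; ring⟩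
    · rintro ⟨p, hp, rfl⟩
      cases p with
      | zero => left; simp [List.take_succ_cons, xsum]
      | succ q =>
        right
        refine ⟨q, by simp at hp; omega, by simp [List.take_succ_cons, xsum_cons]; ring⟩

theorem mem_allvals (is l : List Int) (a : Int) :
    a ∈ allvals is l ↔ ∃ i ∈ is, ∃ p : Nat, p < l.length ∧ a = xsum i (l.take (p + 1)) := by
  simp [allvals, List.mem_flatMap, mem_rowvals]

-- A's inner loop computes the running sum and the running max over the row values
theorem innerA (i : Int) (l : List Int) :
    ∀ (t m : Int),
      l.foldl (fun (st : Int × Int) x =>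
        (st.1 + PySem.Int.bxor i x, max st.2 (st.1 + PySem.Int.bxor i x))) (t, m)
      = (t + xsum i l, (rowvals i t l).foldl max m) := by
  induction l with
  | nil => intro t m; simp [rowvals, xsum]
  | cons x xs ih =>
    intro t m
    simp only [List.foldl_cons, rowvals, xsum_cons, ih]
    rw [add_assoc]

-- A's outer loop is a foldl-max over the row-major flattening
theorem outer_flat (row : Int → List Int) (is : List Int) :
    ∀ m : Int, is.foldl (fun m i => (row i).foldl max m) m = (is.flatMap row).foldl max m := by
  induction is with
  | nil => intro m; simp
  | cons i is ih => intro m; simp [List.foldl_append, ih]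

theorem A_eq (nums : List Int) (k : Int) :
    max_xor_sum nums k = (allvals (PySem.List.pyRange 0 (k + 1) 1) nums).foldl max 0 := by
  unfold max_xor_sum
  have hfun : (fun (max_sum i : Int) =>
      ((PySem.List.pyRange 0 (nums.length : Int) 1).foldl
        (fun (st : Int × Int) j =>
          let temp_sum := st.1 + PySem.Int.bxor i (PySem.List.pyGetD nums j 0)
          (temp_sum, max st.2 temp_sum))
        (0, max_sum)).2)
      = (fun (m i : Int) => (rowvals i 0 nums).foldl max m) := by
    funext m i
    rw [PySem.List.foldl_pyRange_zero_pyGetD' nums 0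
      (fun (st : Int × Int) x =>
        (st.1 + PySem.Int.bxor i x, max st.2 (st.1 + PySem.Int.bxor i x))) (0, m)]
    rw [innerA]
  simp only []
  rw [hfun, outer_flat]
  rfl

-- ---- bit decomposition of Python xor ----

theorem nat_xor_rec (m n : Nat) : m ^^^ n = 2 * (m / 2 ^^^ n / 2) + (m + n) % 2 := by
  conv_lhs => rw [← Nat.div_add_mod (m ^^^ n) 2]
  have h1 : (m ^^^ n) / 2 = m / 2 ^^^ n / 2 := by
    simpa [Nat.shiftRight_one] using @Nat.shiftRight_xor_distrib 1 m n
  rw [h1, Nat.xor_mod_two_eq]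

theorem bxor_zero_left (x : Int) : PySem.Int.bxor 0 x = x := by
  rw [PySem.Int.bxor_comm]; simp

theorem bxor_two (a x : Int) (ha : 0 ≤ a) :
    PySem.Int.bxor a x
      = 2 * PySem.Int.bxor (PySem.Int.floordiv a 2) (PySem.Int.floordiv x 2)
        + (PySem.Int.mod a 2 + PySem.Int.mod x 2) % 2 := by
  obtain ⟨m, rfl⟩ := Int.eq_ofNat_of_zero_le ha
  rw [PySem.Int.floordiv_eq_ediv_of_pos (by norm_num : (0:Int) < 2),
      PySem.Int.floordiv_eq_ediv_of_pos (by norm_num : (0:Int) < 2),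
      PySem.Int.mod_eq_emod_of_pos (by norm_num : (0:Int) < 2),
      PySem.Int.mod_eq_emod_of_pos (by norm_num : (0:Int) < 2)]
  by_cases hx : 0 ≤ x
  · obtain ⟨n, rfl⟩ := Int.eq_ofNat_of_zero_le hx
    have hm2 : ((m:Int)/2) = ((m/2 : Nat) : Int) := by omega
    have hn2 : ((n:Int)/2) = ((n/2 : Nat) : Int) := by omega
    rw [hm2, hn2]
    simp only [PySem.Int.bxor_natCast]
    have h := nat_xor_rec m n
    omega
  · rw [not_le] at hx
    obtain ⟨c, hc⟩ : ∃ c : Nat, x = -(c:Int) - 1 := ⟨(-x-1).toNat, by omega⟩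
    subst hc
    have h1 : PySem.Int.bxor (m:Int) (-(c:Int)-1) = -(((m ^^^ c : Nat) : Int)) - 1 := by
      rw [PySem.Int.bxor]
      rw [if_pos (by positivity), if_neg (by omega)]
      rw [show (-(-(c:Int)-1)-1) = (c:Int) by ring]
      simp
    have h2 : ((-(c:Int)-1)/2) = -((c/2 : Nat):Int) - 1 := by omega
    have h3 : PySem.Int.bxor ((m:Int)/2) (-((c/2:Nat):Int)-1)
        = -(((m/2 ^^^ c/2 : Nat) : Int)) - 1 := by
      rw [PySem.Int.bxor]
      rw [if_pos (by positivity), if_neg (by omega)]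
      rw [show (-(-((c/2:Nat):Int)-1)-1) = ((c/2:Nat):Int) by ring,
          show ((m:Int)/2) = ((m/2:Nat):Int) by omega]
      simp
      congr 1
    rw [h1, h2, h3]
    have h := nat_xor_rec m c
    omega

theorem pbit_nonneg (x : Int) (b : Nat) : 0 ≤ pbit x b :=
  PySem.Int.mod_nonneg _ (by norm_num)

theorem pbit_lt_two (x : Int) (b : Nat) : pbit x b < 2 :=
  PySem.Int.mod_lt _ (by norm_num)

theorem pbit_zero (x : Int) : pbit x 0 = x % 2 := by
  simp [pbit, PySem.Int.floordiv_eq_ediv_of_pos, PySem.Int.mod_eq_emod_of_pos]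

theorem pbit_half (x : Int) (b : Nat) : pbit (PySem.Int.floordiv x 2) b = pbit x (b + 1) := by
  unfold pbit
  rw [PySem.Int.floordiv_eq_ediv_of_pos (by positivity),
      PySem.Int.floordiv_eq_ediv_of_pos (by norm_num : (0:Int) < 2),
      PySem.Int.floordiv_eq_ediv_of_pos (by positivity)]
  rw [Int.ediv_ediv_of_nonneg (by norm_num : (0:Int) ≤ 2)]
  rw [show ((2:Int) * 2^b) = 2^(b+1) by ring]

theorem pbit_band (x : Int) (b : Nat) : PySem.Int.band (x >>> b) 1 = pbit x b := by
  rw [PySem.Int.band_one, pbit, Int.shiftRight_eq_div_pow,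
      PySem.Int.floordiv_eq_ediv_of_pos (by positivity)]
  norm_num

theorem bxor_bits (nb : Nat) : ∀ (i x : Int), 0 ≤ i → i < 2 ^ nb →
    PySem.Int.bxor i x = x + ∑ b ∈ Finset.range nb, pbit i b * (1 - 2 * pbit x b) * 2 ^ b := by
  induction nb with
  | zero =>
    intro i x h0 h1
    have : i = 0 := by simpa using (by omega : i = 0)
    subst this
    simp [bxor_zero_left]
  | succ nb ih =>
    intro i x h0 h1
    rw [bxor_two i x h0]
    have hid : PySem.Int.floordiv i 2 = i / 2 := PySem.Int.floordiv_eq_ediv_of_pos (by norm_num)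
    have h2 : 0 ≤ PySem.Int.floordiv i 2 := by rw [hid]; omega
    have h3 : PySem.Int.floordiv i 2 < 2 ^ nb := by
      rw [hid]
      have : (2:Int)^(nb+1) = 2 * 2^nb := by ring
      omega
    rw [ih (PySem.Int.floordiv i 2) (PySem.Int.floordiv x 2) h2 h3]
    rw [Finset.sum_congr rfl (fun b _ => by rw [pbit_half, pbit_half])]
    rw [Finset.sum_range_succ' (fun b => pbit i b * (1 - 2 * pbit x b) * 2 ^ b) nb]
    rw [PySem.Int.mod_eq_emod_of_pos (by norm_num : (0:Int) < 2),
        PySem.Int.mod_eq_emod_of_pos (by norm_num : (0:Int) < 2)]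
    rw [pbit_zero, pbit_zero]
    rw [mul_add, Finset.mul_sum]
    rw [Finset.sum_congr rfl (fun b _ => by
      show 2 * (pbit i (b+1) * (1 - 2 * pbit x (b+1)) * 2 ^ b)
        = pbit i (b+1) * (1 - 2 * pbit x (b+1)) * 2 ^ (b+1)
      ring)]
    rw [PySem.Int.floordiv_eq_ediv_of_pos (by norm_num : (0:Int) < 2)]
    rcases Int.emod_two_eq i with h | h <;> rw [h] <;> ring_nf <;> omega

theorem xsum_bits (nb : Nat) (i : Int) (hi0 : 0 ≤ i) (hi : i < 2 ^ nb) (l : List Int) :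
    xsum i l = l.sum + LW (wlist nb l) nb i := by
  have key : ∀ l : List Int, xsum i l
      = l.sum + ∑ b ∈ Finset.range nb, pbit i b * (2 ^ b * ((l.length : Int) - 2 * cntb b l)) := by
    intro l
    induction l with
    | nil => simp [xsum, cntb]
    | cons x xs ih =>
      rw [show xsum i (x :: xs) = PySem.Int.bxor i x + xsum i xs by simp [xsum]]
      rw [bxor_bits nb i x hi0 hi, ih]
      have hsplit : ∑ b ∈ Finset.range nb, pbit i b * (2 ^ b * (((x :: xs).length : Int) - 2 * cntb b (x :: xs)))
          = ∑ b ∈ Finset.range nb, (pbit i b * (1 - 2 * pbit x b) * 2 ^ b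
              + pbit i b * (2 ^ b * ((xs.length : Int) - 2 * cntb b xs))) := by
        refine Finset.sum_congr rfl (fun b _ => ?_)
        have : cntb b (x :: xs) = pbit x b + cntb b xs := by simp [cntb]
        rw [this, List.length_cons]
        push_cast
        ring
      rw [hsplit, Finset.sum_add_distrib, List.sum_cons]
      ring
  rw [key l, LW]
  congr 1
  refine Finset.sum_congr rfl (fun b hb => ?_)
  rw [wlist, PySem.List.getD_map_range _ nb b 0 (Finset.mem_range.mp hb)]

-- ---- pbit at and above the top bit ----

theorem pbit_eq_zero_of_lt (i : Int) (nb : Nat) (h0 : 0 ≤ i) (h : i < 2 ^ nb) :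
    pbit i nb = 0 := by
  unfold pbit
  rw [PySem.Int.floordiv_eq_ediv_of_pos (by positivity), Int.ediv_eq_zero_of_lt h0 h]
  simp [PySem.Int.mod_eq_emod_of_pos]

theorem pbit_high (i : Int) (nb : Nat) (h1 : 2 ^ nb ≤ i) (h2 : i < 2 * 2 ^ nb) :
    pbit i nb = 1 := by
  unfold pbit
  rw [PySem.Int.floordiv_eq_ediv_of_pos (by positivity)]
  have : i / 2 ^ nb = 1 := by
    have hr : (i - 2 ^ nb) / (2:Int) ^ nb = 0 := Int.ediv_eq_zero_of_lt (by omega) (by omega)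
    have := Int.add_mul_ediv_right (i - 2 ^ nb) 1 (by positivity : (2:Int) ^ nb ≠ 0)
    simp at this
    omega
  rw [this]
  simp [PySem.Int.mod_eq_emod_of_pos]

theorem pbit_sub_pow (i : Int) (nb b : Nat) (hb : b < nb) :
    pbit (i - 2 ^ nb) b = pbit i b := by
  unfold pbit
  rw [PySem.Int.floordiv_eq_ediv_of_pos (by positivity),
      PySem.Int.floordiv_eq_ediv_of_pos (by positivity),
      PySem.Int.mod_eq_emod_of_pos (by norm_num), PySem.Int.mod_eq_emod_of_pos (by norm_num)]
  have h1 : (i - 2 ^ nb) / (2:Int) ^ b = i / 2 ^ b - 2 ^ (nb - b) := by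
    rw [show ((2:Int) ^ nb) = 2 ^ (nb - b) * 2 ^ b by rw [← pow_add]; congr 1; omega] at *
    rw [show i - 2 ^ (nb-b) * 2 ^ b = i + (-(2 ^ (nb-b))) * 2 ^ b by ring,
        Int.add_mul_ediv_right _ _ (by positivity : (2:Int) ^ b ≠ 0)]
    ring
  rw [h1]
  have h2 : (2:Int) ∣ 2 ^ (nb - b) := dvd_pow_self 2 (by omega)
  omega

theorem LW_succ_lo (w : List Int) (nb : Nat) (i : Int) (h0 : 0 ≤ i) (h : i < 2 ^ nb) :
    LW w (nb + 1) i = LW w nb i := by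
  rw [LW, Finset.sum_range_succ, pbit_eq_zero_of_lt i nb h0 h]
  simp [LW]

theorem LW_succ_hi (w : List Int) (nb : Nat) (i : Int) (h1 : 2 ^ nb ≤ i) (h2 : i < 2 * 2 ^ nb) :
    LW w (nb + 1) i = w.getD nb 0 + LW w nb (i - 2 ^ nb) := by
  rw [LW, Finset.sum_range_succ, pbit_high i nb h1 h2, one_mul, LW]
  have h : ∑ b ∈ Finset.range nb, pbit (i - 2 ^ nb) b * w.getD b 0
      = ∑ b ∈ Finset.range nb, pbit i b * w.getD b 0 :=
    Finset.sum_congr rfl (fun b hb => by rw [pbit_sub_pow i nb b (Finset.mem_range.mp hb)])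
  rw [h]; ring

-- ---- the free maximum ----

theorem bestFree_eq (w : List Int) (nb : Nat) :
    bestFree w nb = ∑ b ∈ Finset.range nb, max (w.getD b 0) 0 := by
  induction nb with
  | zero => simp [bestFree]
  | succ nb ih =>
    rw [Finset.sum_range_succ, ← ih, bestFree, bestFree, List.range_succ, List.filter_append,
        List.map_append, List.sum_append]
    congr 1
    have hg : w.getD nb 0 = w[nb]?.getD 0 := List.getD_eq_getElem?_getD
    by_cases h : 0 < w.getD nb 0
    · rw [show List.filter (fun b => decide (0 < w.getD b 0)) [nb] = [nb] by
        simp [List.filter_cons]; omega]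
      simp only [List.map_cons, List.map_nil, List.sum_cons, List.sum_nil]
      omega
    · rw [show List.filter (fun b => decide (0 < w.getD b 0)) [nb] = [] by
        simp [List.filter_cons]; omega]
      simp only [List.map_nil, List.sum_nil]
      omega

theorem LW_le_bestFree (w : List Int) (nb : Nat) (i : Int) :
    LW w nb i ≤ bestFree w nb := by
  rw [bestFree_eq, LW]
  refine Finset.sum_le_sum (fun b _ => ?_)
  have h1 := pbit_nonneg i b
  have h2 := pbit_lt_two i b
  have : pbit i b = 0 ∨ pbit i b = 1 := by omega
  rcases this with h | h <;> rw [h] <;> simp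

-- the input achieving the free maximum
def freeW (w : List Int) : Nat → Int
  | 0 => 0
  | nb + 1 => freeW w nb + (if 0 < w.getD nb 0 then 2 ^ nb else 0)

theorem freeW_spec (w : List Int) (nb : Nat) :
    0 ≤ freeW w nb ∧ freeW w nb < 2 ^ nb ∧ LW w nb (freeW w nb) = bestFree w nb := by
  induction nb with
  | zero => exact ⟨le_refl _, by simp [freeW], by simp [LW, bestFree]⟩
  | succ nb ih =>
    obtain ⟨ih0, ih1, ih2⟩ := ih
    rw [bestFree_eq, Finset.sum_range_succ, ← bestFree_eq]
    by_cases h : 0 < w.getD nb 0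
    · have hval : freeW w (nb+1) = freeW w nb + 2 ^ nb := by rw [freeW, if_pos h]
      have hmax : max (w.getD nb 0) 0 = w.getD nb 0 := by omega
      refine ⟨by omega, ?_, ?_⟩
      · rw [hval, pow_succ]; omega
      · rw [hval, LW_succ_hi w nb _ (by omega) (by omega)]
        rw [show freeW w nb + 2 ^ nb - 2 ^ nb = freeW w nb by ring, ih2, hmax]
        ring
    · have hval : freeW w (nb+1) = freeW w nb := by rw [freeW, if_neg h, add_zero]
      have hmax : max (w.getD nb 0) 0 = 0 := by omega
      refine ⟨by omega, ?_, ?_⟩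
      · rw [hval, pow_succ]; omega
      · rw [hval, LW_succ_lo w nb _ ih0 ih1, ih2, hmax]; ring

-- ---- bestLE = max over 0 ≤ i ≤ k ----

theorem one_shiftLeft_int (b : Nat) : (1 <<< b : Int) = 2 ^ b := by
  simp [Int.shiftLeft_eq]

theorem bestLE_ub (w : List Int) : ∀ (nb : Nat) (k i : Int), 0 ≤ k → k < 2 ^ nb →
    0 ≤ i → i ≤ k → LW w nb i ≤ bestLE w nb k := by
  intro nb
  induction nb with
  | zero => intro k i hk0 hk1 hi0 hi1; simp [bestLE, LW]
  | succ nb ih =>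
    intro k i hk0 hk1 hi0 hi1
    rw [bestLE, one_shiftLeft_int]
    split_ifs with h
    · rw [LW_succ_lo w nb i hi0 (by omega)]
      exact ih k i hk0 h hi0 hi1
    · rw [not_lt] at h
      by_cases hi : i < 2 ^ nb
      · rw [LW_succ_lo w nb i hi0 hi]
        exact le_trans (LW_le_bestFree w nb i) (le_max_left _ _)
      · rw [not_lt] at hi
        rw [LW_succ_hi w nb i hi (by rw [pow_succ] at hk1; omega)]
        refine le_trans ?_ (le_max_right _ _)
        have := ih (k - 2 ^ nb) (i - 2 ^ nb) (by omega) (by rw [pow_succ] at hk1; omega)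
          (by omega) (by omega)
        omega

theorem bestLE_mem (w : List Int) : ∀ (nb : Nat) (k : Int), 0 ≤ k → k < 2 ^ nb →
    ∃ i, 0 ≤ i ∧ i ≤ k ∧ LW w nb i = bestLE w nb k := by
  intro nb
  induction nb with
  | zero => intro k hk0 hk1; exact ⟨0, le_refl _, hk0, by simp [bestLE, LW]⟩
  | succ nb ih =>
    intro k hk0 hk1
    rw [bestLE, one_shiftLeft_int]
    split_ifs with h
    · obtain ⟨i, hi0, hi1, hi2⟩ := ih k hk0 h
      exact ⟨i, hi0, hi1, by rw [LW_succ_lo w nb i hi0 (by omega), hi2]⟩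
    · rw [not_lt] at h
      rcases max_choice (bestFree w nb) (w.getD nb 0 + bestLE w nb (k - 2 ^ nb)) with hm | hm
      · obtain ⟨hf0, hf1, hf2⟩ := freeW_spec w nb
        exact ⟨freeW w nb, hf0, by omega, by rw [LW_succ_lo w nb _ hf0 hf1, hf2, hm]⟩
      · obtain ⟨i, hi0, hi1, hi2⟩ := ih (k - 2 ^ nb) (by omega) (by rw [pow_succ] at hk1; omega)
        refine ⟨2 ^ nb + i, by omega, by omega, ?_⟩
        rw [LW_succ_hi w nb _ (by omega) (by rw [pow_succ] at hk1; omega)]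
        rw [show 2 ^ nb + i - 2 ^ nb = i by ring, hi2, hm]

-- ---- B's loop invariant ----

theorem cntb_append (b : Nat) (l : List Int) (x : Int) :
    cntb b (l ++ [x]) = cntb b l + pbit x b := by simp [cntb]

theorem B_state (k : Int) (l : List Int) :
    l.foldl
      (fun (st : Int × Int × List Int × Int) x =>
        let p := st.1 + 1
        let T := st.2.1 + x
        let cnt := (List.range (PySem.Int.bitLength k)).map
          (fun b => st.2.2.1.getD b 0 + PySem.Int.band (x >>> b) 1)
        let w := (List.range (PySem.Int.bitLength k)).map
          (fun b => (1 <<< b : Int) * (p - 2 * cnt.getD b 0))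
        (p, T, cnt, max st.2.2.2 (T + bestLE w (PySem.Int.bitLength k) k)))
      (0, 0, List.replicate (PySem.Int.bitLength k) 0, 0)
    = ((l.length : Int), l.sum,
       (List.range (PySem.Int.bitLength k)).map (fun b => cntb b l),
       ((List.range l.length).map (fun t =>
         (l.take (t + 1)).sum
           + bestLE (wlist (PySem.Int.bitLength k) (l.take (t + 1))) (PySem.Int.bitLength k) k)).foldl max 0) := by
  set nb := PySem.Int.bitLength k with hnb
  induction l using List.reverseRecOn with
  | nil =>
    simp only [List.foldl_nil, List.length_nil, List.range_zero, List.map_nil, List.foldl_nil,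
      Nat.cast_zero, List.sum_nil]
    refine Prod.ext rfl (Prod.ext rfl (Prod.ext ?_ rfl))
    show List.replicate nb (0:Int) = (List.range nb).map (fun b => cntb b [])
    rw [show (fun b => cntb b ([]:List Int)) = (fun _ : Nat => (0:Int)) from
      funext (fun b => by simp [cntb])]
    rw [List.map_const', List.length_range]
  | append_singleton l x ih =>
    rw [List.foldl_append, List.foldl_cons, List.foldl_nil, ih]
    simp only []
    have hcnt : (List.range nb).map
        (fun b => ((List.range nb).map (fun b => cntb b l)).getD b 0 + PySem.Int.band (x >>> b) 1)
        = (List.range nb).map (fun b => cntb b (l ++ [x])) := by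
      refine List.map_congr_left (fun b hb => ?_)
      rw [PySem.List.getD_map_range _ nb b 0 (List.mem_range.mp hb), pbit_band, cntb_append]
    rw [hcnt]
    have hw : (List.range nb).map
        (fun b => (1 <<< b : Int) * (((l.length : Int) + 1) - 2 * ((List.range nb).map (fun b => cntb b (l ++ [x]))).getD b 0))
        = wlist nb (l ++ [x]) := by
      unfold wlist
      refine List.map_congr_left (fun b hb => ?_)
      rw [PySem.List.getD_map_range _ nb b 0 (List.mem_range.mp hb)]
      rw [Nat.one_shiftLeft]
      simp only [List.length_append, List.length_cons, List.length_nil]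
      push_cast
      ring
    rw [hw]
    refine Prod.ext (by simp) (Prod.ext (by simp) (Prod.ext rfl ?_))
    show max _ _ = _
    simp only [List.length_append, List.length_cons, List.length_nil]
    rw [List.range_succ, List.map_append, List.foldl_append]
    have hmap : (List.range l.length).map (fun t =>
          ((l ++ [x]).take (t + 1)).sum + bestLE (wlist nb ((l ++ [x]).take (t + 1))) nb k)
        = (List.range l.length).map (fun t =>
          (l.take (t + 1)).sum + bestLE (wlist nb (l.take (t + 1))) nb k) := by
      refine List.map_congr_left (fun t ht => ?_)
      rw [List.take_append_of_le_length (by have := List.mem_range.mp ht; omega)]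
    rw [hmap]
    simp only [List.map_cons, List.map_nil, List.foldl_cons, List.foldl_nil]
    rw [List.take_of_length_le (by simp)]
    simp

-- ---- assembling the two maxima ----

theorem foldl_max_eq_of_bidominate (l₁ l₂ : List Int) (b : Int)
    (h₁ : ∀ a ∈ l₁, ∃ c ∈ l₂, a ≤ c) (h₂ : ∀ c ∈ l₂, ∃ a ∈ l₁, c ≤ a) :
    l₁.foldl max b = l₂.foldl max b := by
  apply le_antisymm
  · rcases PySem.List.foldl_max_mem l₁ b with h | h
    · rw [h]; exact (PySem.List.le_foldl_max l₂ b).1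
    · obtain ⟨c, hc, hle⟩ := h₁ _ h
      exact le_trans hle ((PySem.List.le_foldl_max l₂ b).2 _ hc)
  · rcases PySem.List.foldl_max_mem l₂ b with h | h
    · rw [h]; exact (PySem.List.le_foldl_max l₁ b).1
    · obtain ⟨a, ha, hle⟩ := h₂ _ h
      exact le_trans hle ((PySem.List.le_foldl_max l₁ b).2 _ ha)

theorem k_lt_pow (k : Int) (hk : 0 ≤ k) : k < 2 ^ PySem.Int.bitLength k := by
  have h := PySem.Int.lt_two_pow_bitLength k
  have : (k.natAbs : Int) < ((2 ^ PySem.Int.bitLength k : Nat) : Int) := by exact_mod_cast h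
  rw [Int.natAbs_of_nonneg hk] at this
  simpa using this

-- ===== VERDICT (by name: the statement is the Claim_ definition above) =====
theorem max_xor_sum_spec : Claim_equal_max_xor_sum := by
  intro nums k _
  unfold Spec_max_xor_sum
  by_cases hk : k < 0
  · unfold max_xor_sum max_xor_sum_alt
    rw [if_pos hk, PySem.List.pyRange_one_eq_nil (by omega : k + 1 ≤ 0)]
    rfl
  · rw [not_lt] at hk
    have hklt := k_lt_pow k hk
    rw [A_eq]
    unfold max_xor_sum_alt
    rw [if_neg (by omega)]
    simp only []
    rw [B_state k nums]
    apply foldl_max_eq_of_bidominate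
    · intro a ha
      rw [mem_allvals] at ha
      obtain ⟨i, hi, p, hp, rfl⟩ := ha
      rw [PySem.List.mem_pyRange_one] at hi
      refine ⟨(nums.take (p + 1)).sum
        + bestLE (wlist (PySem.Int.bitLength k) (nums.take (p + 1))) (PySem.Int.bitLength k) k,
        List.mem_map.mpr ⟨p, List.mem_range.mpr hp, rfl⟩, ?_⟩
      rw [xsum_bits (PySem.Int.bitLength k) i hi.1 (by omega) (nums.take (p + 1))]
      have := bestLE_ub (wlist (PySem.Int.bitLength k) (nums.take (p + 1)))
        (PySem.Int.bitLength k) k i hk hklt hi.1 (by omega)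
      omega
    · intro c hc
      obtain ⟨t, ht, rfl⟩ := List.mem_map.mp hc
      rw [List.mem_range] at ht
      obtain ⟨i, hi0, hik, hLW⟩ := bestLE_mem (wlist (PySem.Int.bitLength k) (nums.take (t + 1))) (PySem.Int.bitLength k) k hk hklt
      refine ⟨xsum i (nums.take (t + 1)), ?_, ?_⟩
      · rw [mem_allvals]
        exact ⟨i, PySem.List.mem_pyRange_one.mpr ⟨hi0, by omega⟩, t, ht, rfl⟩
      · rw [xsum_bits (PySem.Int.bitLength k) i hi0 (by omega) (nums.take (t + 1)), hLW]
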